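-- pv_equiv track=rewrite | github.com/invincible-jha/mcp-server-pii-guardian | src/pii_guardian/profiles/pci.py | _mask_pan
-- ===== SOURCE A (Python) =====
-- def _mask_pan(pan: str) -> str:
--     """Apply PCI DSS first-6 / last-4 masking to a PAN string.
--
--     Digits outside the first-6 / last-4 window are replaced with ``*``.
--     Non-digit characters (spaces, hyphens) are preserved in position.
--
--     Parameters
--     ----------
--     pan:
--         The raw PAN string, which may contain spaces or hyphens as separators.
--
--     Returns
--     -------
--     str:
--         The masked PAN.  Returns the original string unchanged if it contains
--         fewer than 10 digit characters (too short to apply the rule safely).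
--     """
--     digits_only = [ch for ch in pan if ch.isdigit()]
--     if len(digits_only) < 10:
--         return pan
--
--     masked_digits = list(digits_only)
--     for index in range(6, len(masked_digits) - 4):
--         masked_digits[index] = "*"
--
--     result_chars: list[str] = []
--     digit_cursor = 0
--     for ch in pan:
--         if ch.isdigit():
--             result_chars.append(masked_digits[digit_cursor])
--             digit_cursor += 1
--         else:
--             result_chars.append(ch)
--
--     return "".join(result_chars)
-- ===== SOURCE B (Python) =====
-- def _split_after_digits(s, k):
--     """Split s into (prefix ending right after its k-th digit, remainder).
--     Assumes s contains at least k digits and k >= 1."""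
--     out = []
--     for i, c in enumerate(s):
--         out.append(c)
--         if c.isdigit():
--             k -= 1
--             if k == 0:
--                 return ''.join(out), s[i+1:]
--     return ''.join(out), ''
--
--
-- def _mask_pan(pan: str) -> str:
--     if sum(c.isdigit() for c in pan) < 10:
--         return pan
--     head, rest = _split_after_digits(pan, 6)
--     tail_rev, mid_rev = _split_after_digits(rest[::-1], 4)
--     masked_mid = ''.join('*' if c.isdigit() else c for c in mid_rev[::-1])
--     return head + masked_mid + tail_rev[::-1]
-- ===== Notes on version B (the rewrite author's own statement) =====
-- stated objective: alternative
-- what changed: B never tracks a per-digit index across the whole string: it locates the cut after the 6th digit by a left scan and the cut before the last 4 digits by a scan over the reversed remainder, then returns head + middle-with-all-digits-starred + tail, replacing A's digits-list/range-mutation/cursor-merge pipeline.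
import Mathlib
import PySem

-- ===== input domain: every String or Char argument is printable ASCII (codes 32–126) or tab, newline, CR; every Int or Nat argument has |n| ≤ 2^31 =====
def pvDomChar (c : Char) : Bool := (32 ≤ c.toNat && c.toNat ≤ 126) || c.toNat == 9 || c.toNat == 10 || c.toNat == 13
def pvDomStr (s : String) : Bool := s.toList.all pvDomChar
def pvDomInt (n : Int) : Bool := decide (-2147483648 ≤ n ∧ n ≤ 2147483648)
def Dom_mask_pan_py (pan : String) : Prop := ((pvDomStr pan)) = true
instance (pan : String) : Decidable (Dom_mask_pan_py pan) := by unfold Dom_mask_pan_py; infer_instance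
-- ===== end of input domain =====

-- B replaces A's digits-list / range-mutation / cursor-merge pipeline by finding the
-- cut after the 6th digit (left scan) and the cut before the last 4 digits (scan over
-- the reversed remainder), then concatenating head + all-digits-starred middle + tail.

-- ===== PORT A =====
def mask_pan_py (pan : String) : String :=
  let digitsOnly := pan.toList.filter (fun ch => PySem.Chars.isdigit ch)
  if PySem.List.len digitsOnly < 10 then pan
  else
    let maskedDigits := (PySem.List.pyRange 6 (PySem.List.len digitsOnly - 4) 1).foldl
        (fun md index => PySem.List.pySetD md index '*') digitsOnly
    let st := pan.toList.foldl
        (fun (st : List Char × Int) ch =>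
          if PySem.Chars.isdigit ch then
            (st.1 ++ [PySem.List.pyGetD maskedDigits st.2 '*'], st.2 + 1)
          else (st.1 ++ [ch], st.2))
        ([], 0)
    String.ofList st.1

-- ===== PORT B =====
-- Source B's _split_after_digits: prefix ending right after the k-th digit, plus remainder
def splitAfter (k : Int) : List Char → List Char × List Char
  | [] => ([], [])
  | c :: rest =>
    if PySem.Chars.isdigit c then
      if k = 1 then ([c], rest)
      else
        let p := splitAfter (k - 1) rest
        (c :: p.1, p.2)
    else
      let p := splitAfter k rest
      (c :: p.1, p.2)

def mask_pan_py_alt (pan : String) : String :=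
  let total : Int := (pan.toList.countP (fun c => PySem.Chars.isdigit c) : Int)
  if total < 10 then pan
  else
    let s1 := splitAfter 6 pan.toList
    let s2 := splitAfter 4 s1.2.reverse
    String.ofList (s1.1 ++
      s2.2.reverse.map (fun c => if PySem.Chars.isdigit c then '*' else c) ++
      s2.1.reverse)

-- ===== PRECONDITION & SPEC =====
def Spec_mask_pan_py (pan : String) (out : String) : Prop := out = mask_pan_py_alt pan
instance (pan : String) (out : String) : Decidable (Spec_mask_pan_py pan out) := by unfold Spec_mask_pan_py; infer_instance

-- ===== CLAIM (what is proved, stated in full; the proofs are below) =====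
def Claim_equal_mask_pan_py : Prop := ∀ (pan : String), Dom_mask_pan_py pan → Spec_mask_pan_py pan (mask_pan_py pan)

-- ===== LEMMAS AND PROOFS =====

-- proof-side abbreviation for A's in-place masking loop over range(6, len-4)
def maskFoldDef (ds : List Char) : List Char :=
  (PySem.List.pyRange 6 ((ds.length : Int) - 4) 1).foldl
    (fun md i => PySem.List.pySetD md i '*') ds

-- proof-side single-pass description of the masked output (a bridge between the
-- two ports; defined here, used only in the lemmas below)
def maskGo (total : Int) (idx : Int) : List Char → List Char
  | [] => []
  | ch :: rest =>
    if PySem.Chars.isdigit ch then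
      (if 6 ≤ idx ∧ idx < total - 4 then '*' else ch) :: maskGo total (idx + 1) rest
    else ch :: maskGo total idx rest

def dcount (cs : List Char) : Nat := cs.countP (fun c => PySem.Chars.isdigit c)

-- A's masking loop, characterised positionally
theorem maskFold_getD (ds : List Char) (b a : Int) (ha : 0 ≤ a) (j : Nat) :
    ((PySem.List.pyRange a b 1).foldl (fun md i => PySem.List.pySetD md i '*') ds).getD j '*' =
      if a ≤ (j : Int) ∧ (j : Int) < b then '*' else ds.getD j '*' := by
  have key : ∀ n : Nat, ∀ a : Int, 0 ≤ a → (b - a).toNat = n → ∀ ds : List Char,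
      ((PySem.List.pyRange a b 1).foldl (fun md i => PySem.List.pySetD md i '*') ds).getD j '*' =
        if a ≤ (j : Int) ∧ (j : Int) < b then '*' else ds.getD j '*' := by
    intro n
    induction n with
    | zero =>
      intro a ha hn ds
      rw [PySem.List.pyRange_one_eq_nil (by omega)]
      simp only [List.foldl_nil]
      rw [if_neg (by omega)]
    | succ n ih =>
      intro a ha hn ds
      rw [PySem.List.pyRange_one_cons (by omega), List.foldl_cons,
        ih (a + 1) (by omega) (by omega)]
      rw [PySem.List.pySetD_of_nonneg ds '*' ha]
      by_cases hj : (j : Int) = a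
      · rw [if_neg (by omega), if_pos (by omega)]
        have hjt : a.toNat = j := by omega
        rw [hjt]
        rcases Nat.lt_or_ge j ds.length with h | h
        · simp [List.getD_eq_getElem?_getD, h]
        · rw [List.getD_eq_getElem?_getD, List.getElem?_eq_none (by simpa using h)]
          rfl
      · have hne : (ds.set a.toNat '*').getD j '*' = ds.getD j '*' := by
          rw [List.getD_eq_getElem?_getD, List.getD_eq_getElem?_getD,
            List.getElem?_set_ne (by omega)]
        rw [hne]
        split_ifs <;> first | rfl | omega
  exact key (b - a).toNat a ha rfl ds

-- A's merge loop produces exactly the single-pass description maskGo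
theorem loopA_eq_maskGo (ds : List Char) (cs pref acc : List Char)
    (hds : ds = pref ++ cs.filter (fun c => PySem.Chars.isdigit c)) :
    (cs.foldl
        (fun (st : List Char × Int) ch =>
          if PySem.Chars.isdigit ch then
            (st.1 ++ [PySem.List.pyGetD (maskFoldDef ds) st.2 '*'], st.2 + 1)
          else (st.1 ++ [ch], st.2))
        (acc, (pref.length : Int))).1 =
      acc ++ maskGo (ds.length : Int) (pref.length : Int) cs := by
  induction cs generalizing pref acc with
  | nil => simp [maskGo]
  | cons ch rest ih =>
    by_cases hd : PySem.Chars.isdigit ch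
    · rw [List.foldl_cons]
      have hstep : (if PySem.Chars.isdigit ch = true then
            ((acc, (pref.length : Int)).1 ++
              [PySem.List.pyGetD (maskFoldDef ds) (acc, (pref.length : Int)).2 '*'],
              (acc, (pref.length : Int)).2 + 1)
          else ((acc, (pref.length : Int)).1 ++ [ch], (acc, (pref.length : Int)).2)) =
          (acc ++ [PySem.List.pyGetD (maskFoldDef ds) (pref.length : Int) '*'],
            ((pref ++ [ch]).length : Int)) := by
        simp [hd]
      rw [hstep, ih (pref ++ [ch]) _ (by simp [hds, List.filter_cons_of_pos hd])]
      have hds' : ds = pref ++ ch :: rest.filter (fun c => PySem.Chars.isdigit c) := by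
        rw [hds, List.filter_cons_of_pos hd]
      have hget : PySem.List.pyGetD (maskFoldDef ds) (pref.length : Int) '*' =
          if 6 ≤ (pref.length : Int) ∧ (pref.length : Int) < (ds.length : Int) - 4
          then '*' else ch := by
        rw [PySem.List.pyGetD_natCast, maskFoldDef,
          maskFold_getD ds ((ds.length : Int) - 4) 6 (by omega) pref.length]
        have : ds.getD pref.length '*' = ch := by
          rw [hds', List.getD_eq_getElem?_getD]
          simp
        rw [this]
      rw [hget]
      simp [maskGo, hd]
    · rw [List.foldl_cons]
      have hstep : (if PySem.Chars.isdigit ch = true then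
            ((acc, (pref.length : Int)).1 ++
              [PySem.List.pyGetD (maskFoldDef ds) (acc, (pref.length : Int)).2 '*'],
              (acc, (pref.length : Int)).2 + 1)
          else ((acc, (pref.length : Int)).1 ++ [ch], (acc, (pref.length : Int)).2)) =
          (acc ++ [ch], (pref.length : Int)) := by
        simp [hd]
      rw [hstep, ih pref _ (by simp [hds, List.filter_cons_of_neg (by simpa using hd)])]
      simp [maskGo, hd]

-- maskGo distributes over append, advancing the digit index by the digit count
theorem dcount_cons_pos (c : Char) (rest : List Char) (h : PySem.Chars.isdigit c = true) :
    dcount (c :: rest) = dcount rest + 1 := by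
  simp [dcount, h]

theorem dcount_cons_neg (c : Char) (rest : List Char) (h : ¬ PySem.Chars.isdigit c = true) :
    dcount (c :: rest) = dcount rest := by
  simp [dcount, h]

theorem maskGo_append (total : Int) (p q : List Char) (idx : Int) :
    maskGo total idx (p ++ q) = maskGo total idx p ++ maskGo total (idx + (dcount p : Int)) q := by
  induction p generalizing idx with
  | nil => simp [maskGo, dcount]
  | cons c rest ih =>
    by_cases hd : PySem.Chars.isdigit c
    · simp only [List.cons_append, maskGo, hd, if_true, ih, dcount_cons_pos c rest hd]
      rw [show idx + 1 + (dcount rest : Int) = idx + ((dcount rest + 1 : Nat) : Int) by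
        push_cast; ring]
    · simp [List.cons_append, maskGo, hd, ih, dcount_cons_neg c rest hd]

-- segments fully left of the mask window are unchanged
theorem maskGo_left (total idx : Int) (p : List Char) (h : idx + (dcount p : Int) ≤ 6) :
    maskGo total idx p = p := by
  induction p generalizing idx with
  | nil => simp [maskGo]
  | cons c rest ih =>
    by_cases hd : PySem.Chars.isdigit c
    · rw [dcount_cons_pos c rest hd] at h
      simp only [maskGo, hd, if_true, ih (idx + 1) (by push_cast at h ⊢; omega)]
      rw [if_neg (by push_cast at h; omega)]
    · rw [dcount_cons_neg c rest hd] at h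
      simp [maskGo, hd, ih idx h]

theorem maskGo_right (total idx : Int) (p : List Char) (h : total - 4 ≤ idx) :
    maskGo total idx p = p := by
  induction p generalizing idx with
  | nil => simp [maskGo]
  | cons c rest ih =>
    by_cases hd : PySem.Chars.isdigit c
    · simp only [maskGo, hd, if_true, ih (idx + 1) (by omega)]
      rw [if_neg (by omega)]
    · simp [maskGo, hd, ih idx h]

-- segments fully inside the mask window have every digit starred
theorem maskGo_mid (total idx : Int) (p : List Char)
    (h6 : 6 ≤ idx) (h : idx + (dcount p : Int) ≤ total - 4) :
    maskGo total idx p = p.map (fun c => if PySem.Chars.isdigit c then '*' else c) := by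
  induction p generalizing idx with
  | nil => simp [maskGo]
  | cons c rest ih =>
    by_cases hd : PySem.Chars.isdigit c
    · rw [dcount_cons_pos c rest hd] at h
      simp only [maskGo, hd, if_true, List.map_cons,
        ih (idx + 1) (by omega) (by push_cast at h ⊢; omega)]
      rw [if_pos (by push_cast at h; omega)]
    · rw [dcount_cons_neg c rest hd] at h
      simp [maskGo, hd, ih idx h6 h]

-- splitAfter k cs splits cs into a prefix holding exactly k digits and the rest
theorem splitAfter_spec (cs : List Char) (k : Int) (hk : 1 ≤ k)
    (hd : (k : Int) ≤ (dcount cs : Int)) :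
    (splitAfter k cs).1 ++ (splitAfter k cs).2 = cs ∧
      (dcount (splitAfter k cs).1 : Int) = k := by
  induction cs generalizing k with
  | nil => simp [dcount] at hd; omega
  | cons c rest ih =>
    by_cases hdg : PySem.Chars.isdigit c
    · have hc : dcount (c :: rest) = dcount rest + 1 := dcount_cons_pos c rest hdg
      by_cases h1 : k = 1
      · subst h1
        have hs : splitAfter 1 (c :: rest) = ([c], rest) := by simp [splitAfter, hdg]
        rw [hs]
        exact ⟨rfl, by simp [dcount, hdg]⟩
      · have hs : splitAfter k (c :: rest) =
            (c :: (splitAfter (k - 1) rest).1, (splitAfter (k - 1) rest).2) := by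
          simp [splitAfter, hdg, h1]
        have ihh := ih (k - 1) (by omega) (by rw [hc] at hd; push_cast at hd ⊢; omega)
        have ih2 := ihh.2
        rw [hs]
        refine ⟨by simpa using ihh.1, ?_⟩
        rw [dcount_cons_pos _ _ hdg]
        push_cast
        omega
    · have hc : dcount (c :: rest) = dcount rest := dcount_cons_neg c rest hdg
      have hs : splitAfter k (c :: rest) =
          (c :: (splitAfter k rest).1, (splitAfter k rest).2) := by
        simp [splitAfter, hdg]
      have ihh := ih k hk (by rw [hc] at hd; exact hd)
      rw [hs]
      exact ⟨by simpa using ihh.1, by rw [dcount_cons_neg _ _ hdg]; exact ihh.2⟩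

theorem dcount_append (p q : List Char) : dcount (p ++ q) = dcount p + dcount q := by
  simp [dcount]

theorem dcount_reverse (p : List Char) : dcount p.reverse = dcount p := by
  simp [dcount]

-- ===== VERDICT (by name: the statement is the Claim_ definition above) =====
theorem mask_pan_py_spec : Claim_equal_mask_pan_py := by
  intro pan _
  unfold Spec_mask_pan_py mask_pan_py mask_pan_py_alt
  simp only [PySem.List.len_eq]
  have hcount : (pan.toList.countP (fun ch => PySem.Chars.isdigit ch) : Int) =
      ((pan.toList.filter (fun ch => PySem.Chars.isdigit ch)).length : Int) := by
    rw [List.countP_eq_length_filter]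
  by_cases hlt : ((pan.toList.filter (fun ch => PySem.Chars.isdigit ch)).length : Int) < 10
  · rw [if_pos hlt, if_pos (by rw [hcount]; exact hlt)]
  · rw [if_neg hlt, if_neg (by rw [hcount]; exact hlt)]
    -- A's output is maskGo total 0 over the string
    have hA := loopA_eq_maskGo (pan.toList.filter (fun c => PySem.Chars.isdigit c))
      pan.toList [] [] (by simp)
    simp only [List.length_nil, Nat.cast_zero, List.nil_append] at hA
    rw [maskFoldDef] at hA
    rw [hA]
    -- now show maskGo total 0 = B's three-slice concatenation
    set cs := pan.toList with hcs
    set total : Int := ((cs.filter (fun c => PySem.Chars.isdigit c)).length : Int) with htotal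
    have htd : total = (dcount cs : Int) := by
      rw [htotal, dcount, List.countP_eq_length_filter]
    have h10 : 10 ≤ total := by omega
    -- first split
    have h1 := splitAfter_spec cs 6 (by omega) (by omega)
    set p1 := (splitAfter 6 cs).1
    set q1 := (splitAfter 6 cs).2
    have hq1 : (dcount q1 : Int) = total - 6 := by
      have hsum := dcount_append p1 q1
      rw [h1.1] at hsum
      have h6 := h1.2
      push_cast at h6 ⊢
      omega
    -- second split, on the reversed remainder
    have h2 := splitAfter_spec q1.reverse 4 (by omega)
      (by rw [dcount_reverse]; omega)
    set p2 := (splitAfter 4 q1.reverse).1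
    set q2 := (splitAfter 4 q1.reverse).2
    have hq1eq : q1 = q2.reverse ++ p2.reverse := by
      have := congrArg List.reverse h2.1
      simpa [List.reverse_append] using this.symm
    have hp2 : (dcount p2.reverse : Int) = 4 := by
      rw [dcount_reverse]; exact h2.2
    have hq2 : (dcount q2.reverse : Int) = total - 10 := by
      have hsum : dcount q1 = dcount q2.reverse + dcount p2.reverse := by
        rw [hq1eq]; exact dcount_append _ _
      omega
    -- decompose maskGo along cs = p1 ++ q2.reverse ++ p2.reverse
    have hsplit : cs = p1 ++ (q2.reverse ++ p2.reverse) := by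
      rw [← hq1eq, h1.1]
    refine congrArg String.ofList ?_
    calc maskGo total 0 cs
        = maskGo total 0 p1 ++
            (maskGo total (0 + (dcount p1 : Int)) q2.reverse ++
             maskGo total (0 + (dcount p1 : Int) + (dcount q2.reverse : Int)) p2.reverse) := by
          rw [hsplit, maskGo_append, maskGo_append]
      _ = p1 ++ (q2.reverse.map (fun c => if PySem.Chars.isdigit c then '*' else c)
            ++ p2.reverse) := by
          rw [maskGo_left total 0 p1 (by rw [h1.2]; omega),
            maskGo_mid total _ q2.reverse (by rw [h1.2]; omega)
              (by rw [h1.2, hq2]; omega),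
            maskGo_right total _ p2.reverse (by rw [h1.2, hq2]; omega)]
      _ = p1 ++ q2.reverse.map (fun c => if PySem.Chars.isdigit c then '*' else c)
            ++ p2.reverse := by rw [List.append_assoc]
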